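-- pv_equiv track=rewrite | github.com/jc-ryan/holistic_automated_red_teaming | multi-turn/multi-turn_reward_computation.py | convert_dialogue_to_all_turns
-- ===== SOURCE A (Python) =====
-- PROMPT_BEGIN: str = 'BEGINNING OF CONVERSATION: '
--
-- PROMPT_USER: str = 'USER: {input} '
--
-- PROMPT_ASSISTANT: str = 'ASSISTANT:'  # should not have a space at the end
--
-- def convert_dialogue_to_all_turns(dialogue, eos_token):
--     """
--     dialogue: {
--         "question_id":, "category":, "attack_vector":, "descriptors:",
--         "dialogue": ['USER':, 'ASSISTANT':, 'USER':, 'ASSISTANT':, ...]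
--     }
--     return: list of formatted dialogues ['BEGIN of CONVERSATIONS : USER: ASSISTANT: <eos>', ...]
--     """
--     dialogue = dialogue["dialogue"]
--     all_turns = []
--
--     if len(dialogue) % 2 != 0:
--         raise ValueError(
--             'The length of `input` must be even, while `input` must end at the assistant response.'
--         )
--     else:
--         buffer = [PROMPT_BEGIN]
--         for i, line in enumerate(dialogue):
--             if i % 2 == 0:
--                 # User input
--                 buffer.extend((PROMPT_USER.format(input=line), PROMPT_ASSISTANT))
--             else:
--                 # Assistant response
--                 buffer.extend((line, eos_token))
--                 all_turns.append("".join(buffer))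
--
--     assert len(all_turns) == len(dialogue) // 2
--
--     return all_turns
-- ===== SOURCE B (Python) =====
-- from itertools import accumulate
--
-- PROMPT_BEGIN: str = 'BEGINNING OF CONVERSATION: '
-- PROMPT_USER: str = 'USER: {input} '
-- PROMPT_ASSISTANT: str = 'ASSISTANT:'
--
--
-- def _pairs(turns):
--     """Chunk the flat turn list into (user, assistant) pairs, recursively."""
--     if not turns:
--         return []
--     return [(turns[0], turns[1])] + _pairs(turns[2:])
--
--
-- def convert_dialogue_to_all_turns(dialogue, eos_token):
--     turns = dialogue["dialogue"]
--     if len(turns) % 2 != 0: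
--         raise ValueError(
--             'The length of `input` must be even, while `input` must end at the assistant response.'
--         )
--     segments = [PROMPT_USER.format(input=u) + PROMPT_ASSISTANT + a + eos_token
--                 for u, a in _pairs(turns)]
--     return [PROMPT_BEGIN + s for s in accumulate(segments)]
-- ===== Notes on version B (the rewrite author's own statement) =====
-- stated objective: idiomatic
-- what changed: Replaces A's interleaved enumerate/i%2 loop that grows a string-buffer list and re-joins it at every assistant turn with a two-phase decomposition: chunk the dialogue into (user, assistant) pairs, map each pair to its formatted segment, then itertools.accumulate the segments and prefix each with PROMPT_BEGIN.
import Mathlib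
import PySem

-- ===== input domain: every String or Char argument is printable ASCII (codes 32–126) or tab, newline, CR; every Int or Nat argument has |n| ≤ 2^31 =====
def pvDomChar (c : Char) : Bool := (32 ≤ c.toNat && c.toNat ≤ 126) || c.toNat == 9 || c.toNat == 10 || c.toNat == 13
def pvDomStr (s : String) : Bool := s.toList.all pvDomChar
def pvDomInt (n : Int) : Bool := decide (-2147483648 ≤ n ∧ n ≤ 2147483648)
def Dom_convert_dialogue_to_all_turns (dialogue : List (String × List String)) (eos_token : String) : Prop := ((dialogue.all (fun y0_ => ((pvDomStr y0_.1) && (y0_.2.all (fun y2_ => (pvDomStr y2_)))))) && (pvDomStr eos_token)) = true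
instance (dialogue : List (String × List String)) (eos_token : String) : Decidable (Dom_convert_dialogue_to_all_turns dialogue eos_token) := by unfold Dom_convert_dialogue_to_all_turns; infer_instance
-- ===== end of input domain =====

-- B replaces A's interleaved i%2 buffer-and-join loop by pair-chunking + per-pair segments + prefix accumulation (same cost; objective: idiomatic/alternative decomposition).

-- ===== PORT A =====
-- 'PROMPT_USER.format(input=line)' is ported by hand as "USER: " ++ line ++ " " (the template is the fixed
-- literal 'USER: {input} ', so format is exactly this concatenation).
def convert_dialogue_to_all_turns (dialogue : List (String × List String)) (eos_token : String) : List String :=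
  match PySem.Dict.get? (PySem.Dict.mk dialogue) "dialogue" with
  | none => []  -- KeyError: excluded by Pre_
  | some d =>
    if d.length % 2 ≠ 0 then []  -- ValueError: excluded by Pre_
    else
      ((PySem.List.enumerate d 0).foldl
        (fun (st : List String × List String) il =>
          if PySem.Int.mod il.1 2 = 0 then
            (st.1, st.2 ++ ["USER: " ++ il.2 ++ " ", "ASSISTANT:"])
          else
            (st.1 ++ [PySem.Str.join "" (st.2 ++ [il.2, eos_token])], st.2 ++ [il.2, eos_token]))
        ([], ["BEGINNING OF CONVERSATION: "])).1

-- ===== PORT B =====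
def pvPairs : List String → List (String × String)
  | [] => []
  | u :: a :: rest => (u, a) :: pvPairs rest
  | [_] => []  -- unreachable under the even-length guard (Python's _pairs would raise IndexError)

-- itertools.accumulate on strings: running concatenation (empty prefix at the start).
def pvAccumulate (acc : String) : List String → List String
  | [] => []
  | s :: rest => (acc ++ s) :: pvAccumulate (acc ++ s) rest

def convert_dialogue_to_all_turns_alt (dialogue : List (String × List String)) (eos_token : String) : List String :=
  match PySem.Dict.get? (PySem.Dict.mk dialogue) "dialogue" with
  | none => []  -- KeyError: excluded by Pre_
  | some turns =>
    if turns.length % 2 ≠ 0 then []  -- ValueError: excluded by Pre_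
    else
      (pvAccumulate "" ((pvPairs turns).map
        (fun p => "USER: " ++ p.1 ++ " " ++ "ASSISTANT:" ++ p.2 ++ eos_token))).map
        (fun s => "BEGINNING OF CONVERSATION: " ++ s)

-- ===== PRECONDITION & SPEC =====
-- Pre_ excludes exactly the inputs where Python A raises: a missing "dialogue" key (KeyError) and an
-- odd-length dialogue list (ValueError).
def Pre_convert_dialogue_to_all_turns (dialogue : List (String × List String)) (eos_token : String) : Prop :=
  (PySem.Dict.get? (PySem.Dict.mk dialogue) "dialogue").isSome = true ∧
  ((PySem.Dict.get? (PySem.Dict.mk dialogue) "dialogue").getD []).length % 2 = 0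
instance (dialogue : List (String × List String)) (eos_token : String) : Decidable (Pre_convert_dialogue_to_all_turns dialogue eos_token) := by unfold Pre_convert_dialogue_to_all_turns; infer_instance

def pvWitness_convert_dialogue_to_all_turns : (List (String × List String)) × String :=
  ([("dialogue", ["hi", "hello!"])], "</s>")

def Spec_convert_dialogue_to_all_turns (dialogue : List (String × List String)) (eos_token : String) (out : List String) : Prop := out = convert_dialogue_to_all_turns_alt dialogue eos_token
instance (dialogue : List (String × List String)) (eos_token : String) (out : List String) : Decidable (Spec_convert_dialogue_to_all_turns dialogue eos_token out) := by unfold Spec_convert_dialogue_to_all_turns; infer_instance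

-- ===== CLAIM (what is proved, stated in full; the proofs are below) =====
def Claim_equal_convert_dialogue_to_all_turns : Prop := ∀ (dialogue : List (String × List String)) (eos_token : String), Dom_convert_dialogue_to_all_turns dialogue eos_token → Pre_convert_dialogue_to_all_turns dialogue eos_token → Spec_convert_dialogue_to_all_turns dialogue eos_token (convert_dialogue_to_all_turns dialogue eos_token)

-- ===== LEMMAS AND PROOFS =====

theorem pv_intercalate_nil (l : List (List Char)) : List.intercalate [] l = l.flatten := by
  induction l with
  | nil => simp [List.intercalate]
  | cons x r ih =>
    cases r with
    | nil => simp [List.intercalate]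
    | cons y r' =>
      simp [List.intercalate, List.intersperse] at *
      simpa using ih

theorem pv_join_empty_append (xs ys : List String) :
    PySem.Str.join "" (xs ++ ys) = PySem.Str.join "" xs ++ PySem.Str.join "" ys := by
  simp [PySem.Str.join, PySem.Chars.join, pv_intercalate_nil]

theorem pv_join_empty_singleton (s : String) : PySem.Str.join "" [s] = s := by
  simp [PySem.Str.join, PySem.Chars.join, pv_intercalate_nil]

theorem pv_accumulate_map (p : String) (xs : List String) : ∀ (acc : String),
    pvAccumulate (p ++ acc) xs = (pvAccumulate acc xs).map (fun s => p ++ s) := by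
  induction xs with
  | nil => intro acc; simp [pvAccumulate]
  | cons s rest ih =>
    intro acc
    simp only [pvAccumulate, List.map, String.append_assoc, List.cons.injEq]
    exact ⟨trivial, ih (acc ++ s)⟩

theorem pv_loopA (eos_token : String) (rest : List String) : ∀ (i : Int), i % 2 = 0 →
    ∀ (ats buf : List String),
    ((PySem.List.enumerate rest i).foldl
        (fun (st : List String × List String) il =>
          if PySem.Int.mod il.1 2 = 0 then
            (st.1, st.2 ++ ["USER: " ++ il.2 ++ " ", "ASSISTANT:"])
          else
            (st.1 ++ [PySem.Str.join "" (st.2 ++ [il.2, eos_token])], st.2 ++ [il.2, eos_token]))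
        (ats, buf)).1
      = ats ++ pvAccumulate (PySem.Str.join "" buf) ((pvPairs rest).map
          (fun p => "USER: " ++ p.1 ++ " " ++ "ASSISTANT:" ++ p.2 ++ eos_token)) := by
  induction rest using pvPairs.induct with
  | case1 =>
    intro i _ ats buf
    simp [PySem.List.enumerate_nil, pvPairs, pvAccumulate]
  | case2 u a rest ih =>
    intro i hi ats buf
    have h0 : PySem.Int.mod i 2 = i % 2 := PySem.Int.mod_eq_emod_of_pos (by omega)
    have h1 : PySem.Int.mod (i + 1) 2 = (i + 1) % 2 := PySem.Int.mod_eq_emod_of_pos (by omega)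
    have he : (i + 1) % 2 = 1 := by omega
    simp only [PySem.List.enumerate_cons, List.foldl_cons, h0, hi, h1, he, reduceIte,
      one_ne_zero]
    rw [ih (i + 1 + 1) (by omega)]
    have hj : PySem.Str.join "" (buf ++ ["USER: " ++ u ++ " ", "ASSISTANT:"] ++ [a, eos_token])
        = PySem.Str.join "" buf ++ ("USER: " ++ u ++ " " ++ "ASSISTANT:" ++ a ++ eos_token) := by
      rw [show buf ++ ["USER: " ++ u ++ " ", "ASSISTANT:"] ++ [a, eos_token]
          = buf ++ (["USER: " ++ u ++ " "] ++ (["ASSISTANT:"] ++ ([a] ++ [eos_token]))) from by simp]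
      simp only [pv_join_empty_append, pv_join_empty_singleton, String.append_assoc]
    rw [hj]
    simp [pvPairs, pvAccumulate, String.append_assoc]
  | case3 x =>
    intro i hi ats buf
    have h0 : PySem.Int.mod i 2 = i % 2 := PySem.Int.mod_eq_emod_of_pos (by omega)
    have hd : (2:Int) ∣ i := by omega
    simp [PySem.List.enumerate_cons, PySem.List.enumerate_nil, hd, pvPairs, pvAccumulate]

-- ===== VERDICT (by name: the statement is the Claim_ definition above) =====
theorem convert_dialogue_to_all_turns_spec : Claim_equal_convert_dialogue_to_all_turns := by
  intro dialogue eos_token _ hpre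
  unfold Spec_convert_dialogue_to_all_turns
  unfold convert_dialogue_to_all_turns convert_dialogue_to_all_turns_alt
  obtain ⟨hsome, heven⟩ := hpre
  cases h : PySem.Dict.get? (PySem.Dict.mk dialogue) "dialogue" with
  | none => simp [h] at hsome
  | some d =>
    rw [h] at heven
    simp only [Option.getD_some] at heven
    simp only [heven, ne_eq, not_true_eq_false, reduceIte]
    rw [pv_loopA eos_token d 0 (by omega) [] ["BEGINNING OF CONVERSATION: "]]
    rw [pv_join_empty_singleton]
    have := pv_accumulate_map "BEGINNING OF CONVERSATION: " ((pvPairs d).map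
      (fun p => "USER: " ++ p.1 ++ " " ++ "ASSISTANT:" ++ p.2 ++ eos_token)) ""
    rw [String.append_empty] at this
    rw [this]
    simp
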